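-- pv_equiv track=rewrite | github.com/spektrum-labs/Transformations | safeguards/backups/sophos/isBackupTested.py | alert_is_resolved
-- ===== SOURCE A (Python) =====
-- def alert_is_resolved(alert):
--     allowed_actions = alert.get("allowedActions", [])
--     if not allowed_actions:
--         return True
--     actions_lower = [a.lower() for a in allowed_actions]
--     if "acknowledge" in actions_lower or "resolved" in actions_lower or "clear" in actions_lower:
--         return True
--     return False
-- ===== SOURCE B (Python) =====
-- def alert_is_resolved(alert):
--     def ok(actions):
--         # structural recursion with short-circuit: first matching action stops the scan
--         if not actions:
--             return False
--         return actions[0].lower() in ("acknowledge", "resolved", "clear") or ok(actions[1:])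
--
--     actions = alert.get("allowedActions", [])
--     return not actions or ok(actions)
-- ===== Notes on version B (the rewrite author's own statement) =====
-- stated objective: alternative
-- what changed: Replaces A's staged passes (materialize a lowercased copy of the list, then three separate membership scans over it) with a short-circuiting structural recursion that tests each action once against the three target names as it walks the list, plus a guard-free 'not actions or ok(actions)' return.
import Mathlib
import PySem

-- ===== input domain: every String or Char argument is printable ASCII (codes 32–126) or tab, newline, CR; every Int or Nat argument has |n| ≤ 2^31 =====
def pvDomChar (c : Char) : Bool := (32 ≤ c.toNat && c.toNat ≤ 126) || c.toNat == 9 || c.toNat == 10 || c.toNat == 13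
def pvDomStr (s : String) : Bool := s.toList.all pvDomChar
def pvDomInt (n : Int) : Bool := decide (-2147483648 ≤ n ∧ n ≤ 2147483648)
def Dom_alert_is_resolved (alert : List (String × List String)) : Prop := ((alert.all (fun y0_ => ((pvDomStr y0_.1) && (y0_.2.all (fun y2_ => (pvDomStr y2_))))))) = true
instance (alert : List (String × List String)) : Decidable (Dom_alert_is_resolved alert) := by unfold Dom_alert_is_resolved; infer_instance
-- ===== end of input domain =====

-- ===== PORT A =====
-- Header: B replaces A's staged passes (build a lowercased list, three membership scans)
-- with a short-circuiting structural recursion testing each action once (alternative decomposition).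
def alert_is_resolved (alert : List (String × List String)) : Bool :=
  let allowed_actions := (PySem.Dict.mk alert).getD "allowedActions" []
  if allowed_actions.isEmpty then true
  else
    let actions_lower := allowed_actions.map PySem.Str.lower
    if actions_lower.contains "acknowledge" || actions_lower.contains "resolved"
        || actions_lower.contains "clear" then true
    else false

-- ===== PORT B =====
-- helper 'ok' of Source B: recursion on the list, short-circuit on the first matching action
def pvOk : List String → Bool
  | [] => false
  | a :: rest =>
      ["acknowledge", "resolved", "clear"].contains (PySem.Str.lower a) || pvOk rest

def alert_is_resolved_alt (alert : List (String × List String)) : Bool :=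
  let actions := (PySem.Dict.mk alert).getD "allowedActions" []
  actions.isEmpty || pvOk actions

-- ===== PRECONDITION & SPEC =====
def Spec_alert_is_resolved (alert : List (String × List String)) (out : Bool) : Prop := out = alert_is_resolved_alt alert
instance (alert : List (String × List String)) (out : Bool) : Decidable (Spec_alert_is_resolved alert out) := by unfold Spec_alert_is_resolved; infer_instance

-- ===== CLAIM (what is proved, stated in full; the proofs are below) =====
def Claim_equal_alert_is_resolved : Prop := ∀ (alert : List (String × List String)), Dom_alert_is_resolved alert → Spec_alert_is_resolved alert (alert_is_resolved alert)

-- ===== LEMMAS AND PROOFS =====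
lemma pvOk_eq_contains (l : List String) :
    pvOk l = ((l.map PySem.Str.lower).contains "acknowledge"
      || (l.map PySem.Str.lower).contains "resolved"
      || (l.map PySem.Str.lower).contains "clear") := by
  induction l with
  | nil => rfl
  | cons a t ih =>
      simp only [pvOk, ih, List.map_cons, List.contains_cons, List.contains_nil,
        Bool.or_false, BEq.comm]
      ac_rfl

-- ===== VERDICT (by name: the statement is the Claim_ definition above) =====
theorem alert_is_resolved_spec : Claim_equal_alert_is_resolved := by
  intro alert _
  unfold Spec_alert_is_resolved alert_is_resolved alert_is_resolved_alt
  cases hE : ((PySem.Dict.mk alert).getD "allowedActions" []).isEmpty <;>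
    simp [hE, pvOk_eq_contains]
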